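-- pv_equiv track=rewrite | github.com/StarSein/BaekJoon | 백준/Gold/16987. 계란으로 계란치기/계란으로 계란치기.py | solution
-- ===== SOURCE A (Python) =====
-- from typing import List, Tuple
--
-- def solution(n: int, eggs: List[Tuple[int, int]]) -> int:
--     s_list = [egg[0] for egg in eggs]
--     w_list = [egg[1] for egg in eggs]
--
--     def dfs(hand_idx: int) -> int:
--         if hand_idx == n:
--             ret = 0
--             for s in s_list:
--                 if s <= 0:
--                     ret += 1
--             return ret
--         if s_list[hand_idx] <= 0:
--             return dfs(hand_idx + 1)
--         ret = 0
--         hit_on = False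
--         for hit_idx in range(n):
--             if hit_idx != hand_idx and s_list[hit_idx] > 0:
--                 hit_on = True
--                 s_list[hit_idx] -= w_list[hand_idx]
--                 s_list[hand_idx] -= w_list[hit_idx]
--                 ret = max(ret, dfs(hand_idx + 1))
--                 s_list[hit_idx] += w_list[hand_idx]
--                 s_list[hand_idx] += w_list[hit_idx]
--         if not hit_on:
--             ret = dfs(hand_idx + 1)
--         return ret
--
--     return dfs(0)
-- ===== SOURCE B (Python) =====
-- from typing import List, Tuple
--
-- def solution(n: int, eggs: List[Tuple[int, int]]) -> int:
--     s_list = [egg[0] for egg in eggs]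
--     w_list = [egg[1] for egg in eggs]
--
--     def hit(s, hand, i):
--         t = list(s)
--         t[i] -= w_list[hand]
--         t[hand] -= w_list[i]
--         return t
--
--     def best(hand, s):
--         if hand == n:
--             return len([x for x in s if x <= 0])
--         if s[hand] <= 0:
--             return best(hand + 1, s)
--         targets = [i for i in range(n) if i != hand and s[i] > 0]
--         vals = [best(hand + 1, hit(s, hand, i)) for i in targets]
--         if not vals:
--             return best(hand + 1, s)
--         return max(vals)
--
--     return best(0, s_list)
-- ===== Notes on version B (the rewrite author's own statement) =====
-- stated objective: alternative
-- what changed: A's in-place mutate-and-undo loop with a (ret, hit_on) flag is replaced by a purely functional staged pass: build the list of hittable targets by comprehension, map the recursion over freshly-copied successor states, and take the max of the nonempty value list.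
import Mathlib
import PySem

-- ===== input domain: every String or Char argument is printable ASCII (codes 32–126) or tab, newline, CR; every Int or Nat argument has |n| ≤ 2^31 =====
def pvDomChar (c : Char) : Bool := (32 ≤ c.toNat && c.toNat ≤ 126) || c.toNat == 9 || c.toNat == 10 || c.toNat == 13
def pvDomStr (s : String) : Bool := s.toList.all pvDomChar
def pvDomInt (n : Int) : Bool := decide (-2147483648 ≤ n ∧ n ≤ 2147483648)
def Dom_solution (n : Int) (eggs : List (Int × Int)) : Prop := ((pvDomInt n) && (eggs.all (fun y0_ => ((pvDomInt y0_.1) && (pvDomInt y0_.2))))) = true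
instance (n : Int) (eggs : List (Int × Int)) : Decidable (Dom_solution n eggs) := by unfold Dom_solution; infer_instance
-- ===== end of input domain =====

-- B replaces A's mutate-and-undo loop with a (ret, hit_on) flag by a purely functional
-- staged pass: build the target list, map the recursion over fresh successor states, take max.
-- Alternative decomposition, same cost. Neither Python mutates its arguments.

-- ===== PORT A =====
-- A's leaf loop: count durabilities ≤ 0
def countA (s : List Int) : Int := s.foldl (fun r x => if x ≤ 0 then r + 1 else r) 0

-- A's inner `for hit_idx in range(n)` loop; state = (ret, hit_on); `rec` is dfs(hand_idx+1)
def loopA (w : List Int) (hand : Nat) (s : List Int) (rec : List Int → Int) :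
    List Nat → Int × Bool → Int × Bool
  | [], p => p
  | hit :: rest, p =>
      loopA w hand s rec rest
        (if hit ≠ hand ∧ 0 < s.getD hit 0 then
           (max p.1 (rec ((s.set hit (s.getD hit 0 - w.getD hand 0)).set hand
                            (s.getD hand 0 - w.getD hit 0))), true)
         else p)

-- A's dfs; fuel k = n - hand_idx (Pre_ guarantees the Python recursion reaches hand_idx = n)
def dfsA (w : List Int) (n : Nat) : Nat → Nat → List Int → Int
  | 0, _, s => countA s
  | k+1, hand, s =>
      if s.getD hand 0 ≤ 0 then dfsA w n k (hand+1) s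
      else
        let p := loopA w hand s (fun s' => dfsA w n k (hand+1) s') (List.range n) (0, false)
        if p.2 then p.1 else dfsA w n k (hand+1) s

def solution (n : Int) (eggs : List (Int × Int)) : Int :=
  dfsA (eggs.map Prod.snd) n.toNat n.toNat 0 (eggs.map Prod.fst)

-- ===== PORT B =====
-- B's leaf: length of the comprehension of broken eggs
def cntB (s : List Int) : Int := ((s.filter (fun x => x ≤ 0)).length : Nat)

-- B's `hit`: a fresh copy of s with the two decrements (t[hand] is read from t, after t[i] changed)
def hitB (w : List Int) (s : List Int) (hand i : Nat) : List Int :=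
  let t := s.set i (s.getD i 0 - w.getD hand 0)
  t.set hand (t.getD hand 0 - w.getD i 0)

-- B's best: targets comprehension, map the recursion, max of the nonempty value list
def bestB (w : List Int) (n : Nat) : Nat → Nat → List Int → Int
  | 0, _, s => cntB s
  | k+1, hand, s =>
      if s.getD hand 0 ≤ 0 then bestB w n k (hand+1) s
      else
        let targets := (List.range n).filter fun i => decide (i ≠ hand) && decide (0 < s.getD i 0)
        let vals := targets.map fun i => bestB w n k (hand+1) (hitB w s hand i)
        match vals with
        | [] => bestB w n k (hand+1) s
        | v :: vs => vs.foldl max v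

def solution_alt (n : Int) (eggs : List (Int × Int)) : Int :=
  bestB (eggs.map Prod.snd) n.toNat n.toNat 0 (eggs.map Prod.fst)

-- ===== PRECONDITION & SPEC =====
-- Pre_ excludes only inputs where A raises: n > len(eggs) gives IndexError, n < 0 gives
-- unbounded recursion (RecursionError); A returns normally exactly when 0 ≤ n ≤ len(eggs).
def Pre_solution (n : Int) (eggs : List (Int × Int)) : Prop := 0 ≤ n ∧ n ≤ eggs.length
instance (n : Int) (eggs : List (Int × Int)) : Decidable (Pre_solution n eggs) := by
  unfold Pre_solution; infer_instance

def pvWitness_solution : Int × (List (Int × Int)) := (3, [(5, 3), (4, 2), (6, 9)])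

def Spec_solution (n : Int) (eggs : List (Int × Int)) (out : Int) : Prop := out = solution_alt n eggs
instance (n : Int) (eggs : List (Int × Int)) (out : Int) : Decidable (Spec_solution n eggs out) := by
  unfold Spec_solution; infer_instance

-- ===== CLAIM (what is proved, stated in full; the proofs are below) =====
def Claim_equal_solution : Prop := ∀ (n : Int) (eggs : List (Int × Int)),
  Dom_solution n eggs → Pre_solution n eggs → Spec_solution n eggs (solution n eggs)

-- ===== LEMMAS AND PROOFS =====

-- the successor state A's loop builds for a chosen hit index
def nxt (w s : List Int) (hand i : Nat) : List Int :=
  (s.set i (s.getD i 0 - w.getD hand 0)).set hand (s.getD hand 0 - w.getD i 0)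

theorem countA_go (s : List Int) (c : Int) :
    s.foldl (fun r x => if x ≤ 0 then r + 1 else r) c = c + cntB s := by
  induction s generalizing c with
  | nil => simp [cntB]
  | cons x t ih =>
      simp only [List.foldl_cons]
      by_cases hx : x ≤ 0 <;> simp [hx, ih, cntB] <;> omega

theorem hitB_eq_nxt (w s : List Int) (hand i : Nat) (h : i ≠ hand) :
    hitB w s hand i = nxt w s hand i := by
  unfold hitB nxt
  simp [List.getD, List.getElem?_set_ne h]

-- characterisation of A's inner loop as a fold over the filtered hit list
theorem loopA_char (w : List Int) (hand : Nat) (s : List Int) (rec : List Int → Int)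
    (hits : List Nat) (r : Int) (b : Bool) :
    loopA w hand s rec hits (r, b) =
      ((hits.filter fun i => decide (i ≠ hand) && decide (0 < s.getD i 0)).foldl
         (fun acc i => max acc (rec (nxt w s hand i))) r,
       b || !(hits.filter fun i => decide (i ≠ hand) && decide (0 < s.getD i 0)).isEmpty) := by
  induction hits generalizing r b with
  | nil => simp [loopA]
  | cons hit rest ih =>
      by_cases h : hit ≠ hand ∧ 0 < s.getD hit 0
      · have hc : (decide (hit ≠ hand) && decide (0 < s.getD hit 0)) = true := by
          simp only [Bool.and_eq_true, decide_eq_true_eq]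
          exact ⟨h.1, h.2⟩
        rw [loopA, if_pos h, ih, List.filter_cons, if_pos hc]
        simp [nxt]
      · have hc : ¬ ((decide (hit ≠ hand) && decide (0 < s.getD hit 0)) = true) := by
          intro hcon
          exact h ⟨of_decide_eq_true (Bool.and_elim_left hcon),
                   of_decide_eq_true (Bool.and_elim_right hcon)⟩
        rw [loopA, if_neg h, ih, List.filter_cons, if_neg hc]

theorem le_foldl_max (g : Nat → Int) (l : List Nat) (r : Int) :
    r ≤ l.foldl (fun acc i => max acc (g i)) r := by
  induction l generalizing r with
  | nil => simp
  | cons x xs ih => exact le_trans (le_max_left _ _) (ih (max r (g x)))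

theorem dfsA_nonneg (w : List Int) (n k hand : Nat) (s : List Int) :
    0 ≤ dfsA w n k hand s := by
  induction k generalizing hand s with
  | zero =>
      simp only [dfsA, countA]
      rw [countA_go]
      have : (0 : Int) ≤ cntB s := by unfold cntB; positivity
      omega
  | succ k ih =>
      simp only [dfsA]
      split
      · exact ih _ _
      · rw [loopA_char]
        split
        · exact le_foldl_max _ _ 0
        · exact ih _ _

theorem dfs_eq (w : List Int) (n k hand : Nat) (s : List Int) :
    bestB w n k hand s = dfsA w n k hand s := by
  induction k generalizing hand s with
  | zero => simp [bestB, dfsA, countA, countA_go]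
  | succ k ih =>
      simp only [bestB, dfsA]
      by_cases hb : s.getD hand 0 ≤ 0
      · rw [if_pos hb, if_pos hb]; exact ih _ _
      · rw [if_neg hb, if_neg hb, loopA_char]
        have hmap : ((List.range n).filter fun i => decide (i ≠ hand) && decide (0 < s.getD i 0)).map
              (fun i => bestB w n k (hand+1) (hitB w s hand i))
            = ((List.range n).filter fun i => decide (i ≠ hand) && decide (0 < s.getD i 0)).map
              (fun i => dfsA w n k (hand+1) (nxt w s hand i)) := by
          apply List.map_congr_left
          intro i hi
          have hne : i ≠ hand := by
            have := (List.mem_filter.mp hi).2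
            simp at this
            exact this.1
          rw [hitB_eq_nxt w s hand i hne, ih]
        rw [hmap]
        cases hfil : (List.range n).filter fun i => decide (i ≠ hand) && decide (0 < s.getD i 0) with
        | nil => simp [ih]
        | cons j rest =>
            simp only [List.map_cons, List.isEmpty_cons, Bool.not_false, Bool.or_true, if_true]
            rw [List.foldl_cons, max_eq_right (dfsA_nonneg w n k (hand+1) (nxt w s hand j)),
              ← List.foldl_map (f := fun i => dfsA w n k (hand+1) (nxt w s hand i))
                (g := fun acc v => max acc v)]

-- ===== VERDICT (by name: the statement is the Claim_ definition above) =====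
theorem solution_spec : Claim_equal_solution := by
  intro n eggs _ _
  unfold Spec_solution solution solution_alt
  exact (dfs_eq (eggs.map Prod.snd) n.toNat n.toNat 0 (eggs.map Prod.fst)).symm
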